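-- pv_equiv track=rewrite | github.com/Foster1466/Sorting-Visualizer | heapSort.py | getColorArray
-- ===== SOURCE A (Python) =====
-- def getColorArray(datalen, length, largest, left, right):
--     colorArray= []
--
--     for i in range(datalen):
--         if i == largest:
--             colorArray.append('red')
--         elif i == left:
--             colorArray.append('blue')
--         elif i == right:
--             colorArray.append('blue')
--         elif i >= length:
--             colorArray.append('green')
--         else:
--             colorArray.append('white')
--
--     return colorArray
-- ===== SOURCE B (Python) =====
-- def getColorArray(datalen, length, largest, left, right):
--     colors = ['green' if i >= length else 'white' for i in range(datalen)]
--     for idx in (right, left):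
--         if 0 <= idx < datalen:
--             colors[idx] = 'blue'
--     if 0 <= largest < datalen:
--         colors[largest] = 'red'
--     return colors
-- ===== Notes on version B (the rewrite author's own statement) =====
-- stated objective: simpler
-- what changed: Replaces the per-index 5-way branch loop with one comprehension building the green/white base and three guarded point overrides (right, left as blue, then largest as red, so largest wins ties).
import Mathlib
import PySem

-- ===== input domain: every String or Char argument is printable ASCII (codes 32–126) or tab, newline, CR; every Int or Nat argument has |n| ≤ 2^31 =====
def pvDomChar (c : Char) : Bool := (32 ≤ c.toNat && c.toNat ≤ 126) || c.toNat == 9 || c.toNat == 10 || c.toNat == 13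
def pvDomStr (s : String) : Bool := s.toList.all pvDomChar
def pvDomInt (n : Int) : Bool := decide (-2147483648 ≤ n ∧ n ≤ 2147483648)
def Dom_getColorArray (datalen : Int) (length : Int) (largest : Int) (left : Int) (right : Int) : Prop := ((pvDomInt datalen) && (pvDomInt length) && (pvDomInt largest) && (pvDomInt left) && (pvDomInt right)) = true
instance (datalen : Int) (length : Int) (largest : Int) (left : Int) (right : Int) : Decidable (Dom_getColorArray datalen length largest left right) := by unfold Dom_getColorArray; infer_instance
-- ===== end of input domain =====

-- B replaces A's per-index 5-way branch loop with a one-pass green/white base list plus three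
-- guarded point overrides (right, left to blue, then largest to red); simpler, same O(n) cost.
-- ===== PORT A =====
def getColorArray (datalen : Int) (length : Int) (largest : Int) (left : Int) (right : Int) : List String :=
  (PySem.List.pyRange 0 datalen 1).foldl (fun colorArray i =>
    if i = largest then colorArray ++ ["red"]
    else if i = left then colorArray ++ ["blue"]
    else if i = right then colorArray ++ ["blue"]
    else if i ≥ length then colorArray ++ ["green"]
    else colorArray ++ ["white"]) []

-- ===== PORT B =====
-- guarded point override: colors[idx] = c when 0 ≤ idx < datalen, else no effect
def pvSetAt (colors : List String) (idx : Int) (c : String) (datalen : Int) : List String :=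
  if 0 ≤ idx ∧ idx < datalen then colors.set idx.toNat c else colors

def getColorArray_alt (datalen : Int) (length : Int) (largest : Int) (left : Int) (right : Int) : List String :=
  let base := (PySem.List.pyRange 0 datalen 1).map (fun i => if i ≥ length then "green" else "white")
  pvSetAt (pvSetAt (pvSetAt base right "blue" datalen) left "blue" datalen) largest "red" datalen

-- ===== PRECONDITION & SPEC =====
def Spec_getColorArray (datalen : Int) (length : Int) (largest : Int) (left : Int) (right : Int) (out : List String) : Prop := out = getColorArray_alt datalen length largest left right
instance (datalen : Int) (length : Int) (largest : Int) (left : Int) (right : Int) (out : List String) : Decidable (Spec_getColorArray datalen length largest left right out) := by unfold Spec_getColorArray; infer_instance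

-- ===== CLAIM (what is proved, stated in full; the proofs are below) =====
def Claim_equal_getColorArray : Prop := ∀ (datalen : Int) (length : Int) (largest : Int) (left : Int) (right : Int), Dom_getColorArray datalen length largest left right → Spec_getColorArray datalen length largest left right (getColorArray datalen length largest left right)

-- ===== LEMMAS AND PROOFS =====

-- appending one element per iteration is mapping
theorem pv_foldl_snoc (g : Int → String) : ∀ (xs : List Int) (init : List String),
    xs.foldl (fun acc i => acc ++ [g i]) init = init ++ xs.map g := by
  intro xs
  induction xs with
  | nil => intro init; simp
  | cons x t ih => intro init; simp [List.foldl, ih]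

-- A's fold is a map of the 5-way color choice over the range
theorem pv_portA_eq_map (datalen length largest left right : Int) :
    getColorArray datalen length largest left right =
      (PySem.List.pyRange 0 datalen 1).map (fun i =>
        if i = largest then "red"
        else if i = left then "blue"
        else if i = right then "blue"
        else if i ≥ length then "green"
        else "white") := by
  unfold getColorArray
  have h : (fun (colorArray : List String) (i : Int) =>
      if i = largest then colorArray ++ ["red"]
      else if i = left then colorArray ++ ["blue"]
      else if i = right then colorArray ++ ["blue"]
      else if i ≥ length then colorArray ++ ["green"]
      else colorArray ++ ["white"]) =
      (fun (acc : List String) (i : Int) => acc ++ [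
        if i = largest then "red"
        else if i = left then "blue"
        else if i = right then "blue"
        else if i ≥ length then "green"
        else "white"]) := by
    funext acc i; split_ifs <;> rfl
  rw [h, pv_foldl_snoc]
  simp

theorem pv_length_alt (datalen length largest left right : Int) :
    (getColorArray_alt datalen length largest left right).length = datalen.toNat := by
  unfold getColorArray_alt pvSetAt
  split_ifs <;> simp [PySem.List.length_pyRange_one]

theorem pv_main (datalen length largest left right : Int) :
    getColorArray datalen length largest left right =
      getColorArray_alt datalen length largest left right := by
  rw [pv_portA_eq_map]
  apply List.ext_getElem
  · simp [pv_length_alt, PySem.List.length_pyRange_one]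
  · intro k hk hk'
    have hkn : k < datalen.toNat := by
      simpa [PySem.List.length_pyRange_one] using hk
    have hkd : (k : Int) < datalen := by omega
    simp only [List.getElem_map, PySem.List.getElem_pyRange_one]
    unfold getColorArray_alt pvSetAt
    simp only []
    split_ifs with h1 h2 h3 <;>
    · simp only [List.getElem_set, List.getElem_map, PySem.List.getElem_pyRange_one]
      split_ifs <;> first | rfl | omega

-- ===== VERDICT (by name: the statement is the Claim_ definition above) =====
theorem getColorArray_spec : Claim_equal_getColorArray := by
  intro datalen length largest left right _
  unfold Spec_getColorArray
  exact pv_main datalen length largest left right
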